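-- pv_equiv track=rewrite | github.com/niblyx-malnus/clurd | urbit_dojo.py | parse_command_string
-- ===== SOURCE A (Python) =====
-- from typing import Dict, List, Optional
--
-- def parse_command_string(cmd_str: str) -> List[str]:
--     """
--     Parse command string with escape sequences to character list
--
--     Handles escape sequences like \t, \n, \b, etc.
--
--     Args:
--         cmd_str: Command string that may contain escape sequences
--
--     Returns:
--         List of individual characters including special characters
--     """
--     chars = []
--     i = 0
--     while i < len(cmd_str):
--         if cmd_str[i] == '\\' and i + 1 < len(cmd_str):
--             # Check for arrow key sequences
--             if cmd_str[i:i+3] == '\\up':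
--                 chars.append('ARROW_UP')
--                 i += 3
--                 continue
--             elif cmd_str[i:i+5] == '\\down':
--                 chars.append('ARROW_DOWN')
--                 i += 5
--                 continue
--             elif cmd_str[i:i+5] == '\\left':
--                 chars.append('ARROW_LEFT')
--                 i += 5
--                 continue
--             elif cmd_str[i:i+6] == '\\right':
--                 chars.append('ARROW_RIGHT')
--                 i += 6
--                 continue
--
--             # Handle regular escape sequences
--             next_char = cmd_str[i + 1]
--             if next_char == 't':
--                 chars.append('\t')
--             elif next_char == 'n':
--                 chars.append('\n')
--             elif next_char == 'b':
--                 chars.append('\b')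
--             elif next_char == 'r':
--                 chars.append('\r')
--             elif next_char == '\\':
--                 chars.append('\\')
--             elif next_char == '!':
--                 chars.append('!')
--             else:
--                 # Unknown escape sequence, keep both characters
--                 chars.append('\\')
--                 chars.append(next_char)
--             i += 2
--         else:
--             # Regular character
--             chars.append(cmd_str[i])
--             i += 1
--
--     return chars
-- ===== SOURCE B (Python) =====
-- import re
-- from typing import List
--
-- _TOKEN = re.compile(r'\\up|\\down|\\left|\\right|\\t|\\n|\\b|\\r|\\\\|\\!|\\(.)|.', re.DOTALL)
--
-- _MAP = {
--     r'\up': ['ARROW_UP'],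
--     r'\down': ['ARROW_DOWN'],
--     r'\left': ['ARROW_LEFT'],
--     r'\right': ['ARROW_RIGHT'],
--     r'\t': ['\t'],
--     r'\n': ['\n'],
--     r'\b': ['\b'],
--     r'\r': ['\r'],
--     '\\\\': ['\\'],
--     r'\!': ['!'],
-- }
--
-- def parse_command_string(cmd_str: str) -> List[str]:
--     chars: List[str] = []
--     for m in _TOKEN.finditer(cmd_str):
--         tok = m.group(0)
--         out = _MAP.get(tok)
--         if out is not None:
--             chars.extend(out)
--         elif m.group(1) is not None:
--             # unknown escape: keep backslash and the escaped character
--             chars.append('\\')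
--             chars.append(m.group(1))
--         else:
--             chars.append(tok)
--     return chars
-- ===== Notes on version B (the rewrite author's own statement) =====
-- stated objective: idiomatic
-- what changed: Replaced the manual index-advancing while-loop with its slice comparisons and if/elif escape chain by a single compiled regex tokenizer (one longest-first alternation with DOTALL) iterated with re.finditer, mapping each matched token to its output via a table.
import Mathlib
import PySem

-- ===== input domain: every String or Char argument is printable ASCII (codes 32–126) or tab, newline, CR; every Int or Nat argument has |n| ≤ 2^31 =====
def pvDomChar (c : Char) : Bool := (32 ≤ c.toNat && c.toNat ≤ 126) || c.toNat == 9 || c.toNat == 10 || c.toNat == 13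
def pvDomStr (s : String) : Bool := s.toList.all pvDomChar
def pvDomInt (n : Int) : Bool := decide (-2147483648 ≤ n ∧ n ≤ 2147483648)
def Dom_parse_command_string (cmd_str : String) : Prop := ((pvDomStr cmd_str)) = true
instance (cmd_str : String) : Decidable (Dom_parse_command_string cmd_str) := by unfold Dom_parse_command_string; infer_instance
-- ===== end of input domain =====

-- B replaces A's manual index-and-slice while-loop by a single-pass regex tokenizer
-- (one longest-first alternation matched left to right); same result, idiomatic rewrite.

-- ===== PORT A =====
-- A's while-loop over index i; the Python slice cmd_str[i:i+k] (0 ≤ i) is (cs.drop i).take k and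
-- cmd_str[i] under the loop guard 0 ≤ i < len is cs[i]! — both exact on in-range non-negative indices.
def parse_command_string_loop (cs : List Char) : Nat → List String → Nat → List String
  | 0, chars, _ => chars      -- fuel only bounds the iteration count (≥ one step per char); it never changes the result
  | fuel + 1, chars, i =>
    if i < cs.length then
      if cs[i]! = '\\' ∧ i + 1 < cs.length then
        if (cs.drop i).take 3 = ['\\', 'u', 'p'] then
          parse_command_string_loop cs fuel (chars ++ ["ARROW_UP"]) (i + 3)
        else if (cs.drop i).take 5 = ['\\', 'd', 'o', 'w', 'n'] then
          parse_command_string_loop cs fuel (chars ++ ["ARROW_DOWN"]) (i + 5)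
        else if (cs.drop i).take 5 = ['\\', 'l', 'e', 'f', 't'] then
          parse_command_string_loop cs fuel (chars ++ ["ARROW_LEFT"]) (i + 5)
        else if (cs.drop i).take 6 = ['\\', 'r', 'i', 'g', 'h', 't'] then
          parse_command_string_loop cs fuel (chars ++ ["ARROW_RIGHT"]) (i + 6)
        else
          let next_char := cs[i + 1]!
          if next_char = 't' then parse_command_string_loop cs fuel (chars ++ ["\t"]) (i + 2)
          else if next_char = 'n' then parse_command_string_loop cs fuel (chars ++ ["\n"]) (i + 2)
          else if next_char = 'b' then parse_command_string_loop cs fuel (chars ++ ["\x08"]) (i + 2)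
          else if next_char = 'r' then parse_command_string_loop cs fuel (chars ++ ["\r"]) (i + 2)
          else if next_char = '\\' then parse_command_string_loop cs fuel (chars ++ ["\\"]) (i + 2)
          else if next_char = '!' then parse_command_string_loop cs fuel (chars ++ ["!"]) (i + 2)
          else parse_command_string_loop cs fuel (chars ++ ["\\", String.ofList [next_char]]) (i + 2)
      else
        parse_command_string_loop cs fuel (chars ++ [String.ofList [cs[i]!]]) (i + 1)
    else chars

def parse_command_string (cmd_str : String) : List String :=
  parse_command_string_loop cmd_str.toList cmd_str.toList.length [] 0

-- ===== PORT B =====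
-- Source B tokenizes with one compiled regex alternation (longest-first, DOTALL) and maps each matched
-- token to its output.  re.finditer's repeated leftmost ordered-alternation matching is ported as
-- this ordered pattern match over the character list (first pattern wins = the regex's alternative
-- order); the _MAP lookup / group(1) dispatch of Source B is the right-hand sides.
def parse_command_string_tok : List Char → List String
  | '\\' :: 'u' :: 'p' :: r => "ARROW_UP" :: parse_command_string_tok r
  | '\\' :: 'd' :: 'o' :: 'w' :: 'n' :: r => "ARROW_DOWN" :: parse_command_string_tok r
  | '\\' :: 'l' :: 'e' :: 'f' :: 't' :: r => "ARROW_LEFT" :: parse_command_string_tok r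
  | '\\' :: 'r' :: 'i' :: 'g' :: 'h' :: 't' :: r => "ARROW_RIGHT" :: parse_command_string_tok r
  | '\\' :: 't' :: r => "\t" :: parse_command_string_tok r
  | '\\' :: 'n' :: r => "\n" :: parse_command_string_tok r
  | '\\' :: 'b' :: r => "\x08" :: parse_command_string_tok r
  | '\\' :: 'r' :: r => "\r" :: parse_command_string_tok r
  | '\\' :: '\\' :: r => "\\" :: parse_command_string_tok r
  | '\\' :: '!' :: r => "!" :: parse_command_string_tok r
  | '\\' :: c :: r => "\\" :: String.ofList [c] :: parse_command_string_tok r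
  | c :: r => String.ofList [c] :: parse_command_string_tok r
  | [] => []

def parse_command_string_alt (cmd_str : String) : List String :=
  parse_command_string_tok cmd_str.toList

-- ===== PRECONDITION & SPEC =====
def Spec_parse_command_string (cmd_str : String) (out : List String) : Prop := out = parse_command_string_alt cmd_str
instance (cmd_str : String) (out : List String) : Decidable (Spec_parse_command_string cmd_str out) := by unfold Spec_parse_command_string; infer_instance

-- ===== CLAIM (what is proved, stated in full; the proofs are below) =====
def Claim_equal_parse_command_string : Prop := ∀ (cmd_str : String), Dom_parse_command_string cmd_str → Spec_parse_command_string cmd_str (parse_command_string cmd_str)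

-- ===== LEMMAS AND PROOFS =====

theorem pv_drop_len {cs xs : List Char} {i : Nat} (h : cs.drop i = xs) :
    cs.length - i = xs.length := by
  have := congrArg List.length h; simpa using this

theorem pv_getElem!_drop {cs : List Char} {i : Nat} {c : Char} {r : List Char}
    (h : cs.drop i = c :: r) : cs[i]! = c := by
  have h0 : cs[i]? = some c := by
    have h1 : (List.drop i cs)[0]? = cs[i + 0]? := List.getElem?_drop
    rw [h] at h1; simpa using h1.symm
  simp [List.getElem!_eq_getElem?_getD, h0]

theorem pv_drop_add {cs xs : List Char} {i k : Nat} (h : cs.drop i = xs) :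
    cs.drop (i + k) = xs.drop k := by
  rw [← h, List.drop_drop, Nat.add_comm]

theorem parse_command_string_loop_eq (fuel : Nat) :
    ∀ (cs : List Char) (i : Nat) (chars : List String), cs.length ≤ i + fuel →
      parse_command_string_loop cs fuel chars i = chars ++ parse_command_string_tok (cs.drop i) := by
  induction fuel with
  | zero =>
    intro cs i chars hfe
    rw [List.drop_eq_nil_of_le (by omega)]
    simp [parse_command_string_loop, parse_command_string_tok]
  | succ fuel ih =>
  intro cs i chars hfe
  rw [parse_command_string_tok.eq_def]
  split
  case h_1 x r heq =>
    have hL := pv_drop_len heq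
    simp only [List.length_cons] at hL
    have e0 : cs[i]! = '\\' := pv_getElem!_drop heq
    conv_lhs => rw [parse_command_string_loop]
    rw [if_pos (show i < cs.length by omega),
        if_pos (show cs[i]! = '\\' ∧ i + 1 < cs.length from ⟨e0, by omega⟩),
        if_pos (show (cs.drop i).take 3 = ['\\', 'u', 'p'] by rw [heq]; simp)]
    rw [ih cs (i + 3) (chars ++ ["ARROW_UP"]) (by omega),
        pv_drop_add (k := 3) heq]
    simp
  case h_2 x r heq =>
    have hL := pv_drop_len heq
    simp only [List.length_cons] at hL
    have e0 : cs[i]! = '\\' := pv_getElem!_drop heq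
    conv_lhs => rw [parse_command_string_loop]
    rw [if_pos (show i < cs.length by omega),
        if_pos (show cs[i]! = '\\' ∧ i + 1 < cs.length from ⟨e0, by omega⟩),
        if_neg (show ¬(cs.drop i).take 3 = ['\\', 'u', 'p'] by rw [heq]; simp),
        if_pos (show (cs.drop i).take 5 = ['\\', 'd', 'o', 'w', 'n'] by rw [heq]; simp)]
    rw [ih cs (i + 5) (chars ++ ["ARROW_DOWN"]) (by omega),
        pv_drop_add (k := 5) heq]
    simp
  case h_3 x r heq =>
    have hL := pv_drop_len heq
    simp only [List.length_cons] at hL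
    have e0 : cs[i]! = '\\' := pv_getElem!_drop heq
    conv_lhs => rw [parse_command_string_loop]
    rw [if_pos (show i < cs.length by omega),
        if_pos (show cs[i]! = '\\' ∧ i + 1 < cs.length from ⟨e0, by omega⟩),
        if_neg (show ¬(cs.drop i).take 3 = ['\\', 'u', 'p'] by rw [heq]; simp),
        if_neg (show ¬(cs.drop i).take 5 = ['\\', 'd', 'o', 'w', 'n'] by rw [heq]; simp),
        if_pos (show (cs.drop i).take 5 = ['\\', 'l', 'e', 'f', 't'] by rw [heq]; simp)]
    rw [ih cs (i + 5) (chars ++ ["ARROW_LEFT"]) (by omega),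
        pv_drop_add (k := 5) heq]
    simp
  case h_4 x r heq =>
    have hL := pv_drop_len heq
    simp only [List.length_cons] at hL
    have e0 : cs[i]! = '\\' := pv_getElem!_drop heq
    conv_lhs => rw [parse_command_string_loop]
    rw [if_pos (show i < cs.length by omega),
        if_pos (show cs[i]! = '\\' ∧ i + 1 < cs.length from ⟨e0, by omega⟩),
        if_neg (show ¬(cs.drop i).take 3 = ['\\', 'u', 'p'] by rw [heq]; simp),
        if_neg (show ¬(cs.drop i).take 5 = ['\\', 'd', 'o', 'w', 'n'] by rw [heq]; simp),
        if_neg (show ¬(cs.drop i).take 5 = ['\\', 'l', 'e', 'f', 't'] by rw [heq]; simp),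
        if_pos (show (cs.drop i).take 6 = ['\\', 'r', 'i', 'g', 'h', 't'] by rw [heq]; simp)]
    rw [ih cs (i + 6) (chars ++ ["ARROW_RIGHT"]) (by omega),
        pv_drop_add (k := 6) heq]
    simp
  case h_5 x r heq =>
    have hL := pv_drop_len heq
    simp only [List.length_cons] at hL
    have e0 : cs[i]! = '\\' := pv_getElem!_drop heq
    have hd1 : cs.drop (i + 1) = 't' :: r := by simpa using pv_drop_add (k := 1) heq
    have e1 : cs[i + 1]! = 't' := pv_getElem!_drop hd1
    conv_lhs => rw [parse_command_string_loop]
    rw [if_pos (show i < cs.length by omega),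
        if_pos (show cs[i]! = '\\' ∧ i + 1 < cs.length from ⟨e0, by omega⟩),
        if_neg (show ¬(cs.drop i).take 3 = ['\\', 'u', 'p'] by rw [heq]; simp),
        if_neg (show ¬(cs.drop i).take 5 = ['\\', 'd', 'o', 'w', 'n'] by rw [heq]; simp),
        if_neg (show ¬(cs.drop i).take 5 = ['\\', 'l', 'e', 'f', 't'] by rw [heq]; simp),
        if_neg (show ¬(cs.drop i).take 6 = ['\\', 'r', 'i', 'g', 'h', 't'] by rw [heq]; simp)]
    simp only [e1]
    rw [if_pos trivial]
    rw [ih cs (i + 2) (chars ++ ["\t"]) (by omega),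
        pv_drop_add (k := 2) heq]
    simp
  case h_6 x r heq =>
    have hL := pv_drop_len heq
    simp only [List.length_cons] at hL
    have e0 : cs[i]! = '\\' := pv_getElem!_drop heq
    have hd1 : cs.drop (i + 1) = 'n' :: r := by simpa using pv_drop_add (k := 1) heq
    have e1 : cs[i + 1]! = 'n' := pv_getElem!_drop hd1
    conv_lhs => rw [parse_command_string_loop]
    rw [if_pos (show i < cs.length by omega),
        if_pos (show cs[i]! = '\\' ∧ i + 1 < cs.length from ⟨e0, by omega⟩),
        if_neg (show ¬(cs.drop i).take 3 = ['\\', 'u', 'p'] by rw [heq]; simp),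
        if_neg (show ¬(cs.drop i).take 5 = ['\\', 'd', 'o', 'w', 'n'] by rw [heq]; simp),
        if_neg (show ¬(cs.drop i).take 5 = ['\\', 'l', 'e', 'f', 't'] by rw [heq]; simp),
        if_neg (show ¬(cs.drop i).take 6 = ['\\', 'r', 'i', 'g', 'h', 't'] by rw [heq]; simp)]
    simp only [e1]
    rw [if_pos trivial]
    rw [ih cs (i + 2) (chars ++ ["\n"]) (by omega),
        pv_drop_add (k := 2) heq]
    simp
  case h_7 x r heq =>
    have hL := pv_drop_len heq
    simp only [List.length_cons] at hL
    have e0 : cs[i]! = '\\' := pv_getElem!_drop heq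
    have hd1 : cs.drop (i + 1) = 'b' :: r := by simpa using pv_drop_add (k := 1) heq
    have e1 : cs[i + 1]! = 'b' := pv_getElem!_drop hd1
    conv_lhs => rw [parse_command_string_loop]
    rw [if_pos (show i < cs.length by omega),
        if_pos (show cs[i]! = '\\' ∧ i + 1 < cs.length from ⟨e0, by omega⟩),
        if_neg (show ¬(cs.drop i).take 3 = ['\\', 'u', 'p'] by rw [heq]; simp),
        if_neg (show ¬(cs.drop i).take 5 = ['\\', 'd', 'o', 'w', 'n'] by rw [heq]; simp),
        if_neg (show ¬(cs.drop i).take 5 = ['\\', 'l', 'e', 'f', 't'] by rw [heq]; simp),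
        if_neg (show ¬(cs.drop i).take 6 = ['\\', 'r', 'i', 'g', 'h', 't'] by rw [heq]; simp)]
    simp only [e1]
    rw [if_pos trivial]
    rw [ih cs (i + 2) (chars ++ ["\x08"]) (by omega),
        pv_drop_add (k := 2) heq]
    simp
  case h_8 x r hnr heq =>
    have hL := pv_drop_len heq
    simp only [List.length_cons] at hL
    have e0 : cs[i]! = '\\' := pv_getElem!_drop heq
    have hd1 : cs.drop (i + 1) = 'r' :: r := by simpa using pv_drop_add (k := 1) heq
    have e1 : cs[i + 1]! = 'r' := pv_getElem!_drop hd1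
    have hn6 : ¬(cs.drop i).take 6 = ['\\', 'r', 'i', 'g', 'h', 't'] := by
      rw [heq]; intro hc
      simp only [List.take_succ_cons, List.cons.injEq, true_and] at hc
      have hc' : r.take 4 = ['i', 'g', 'h', 't'] := by simpa using hc
      apply hnr (r.drop 4)
      conv_lhs => rw [← List.take_append_drop 4 r]
      rw [hc']
      simp
    conv_lhs => rw [parse_command_string_loop]
    rw [if_pos (show i < cs.length by omega),
        if_pos (show cs[i]! = '\\' ∧ i + 1 < cs.length from ⟨e0, by omega⟩),
        if_neg (show ¬(cs.drop i).take 3 = ['\\', 'u', 'p'] by rw [heq]; simp),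
        if_neg (show ¬(cs.drop i).take 5 = ['\\', 'd', 'o', 'w', 'n'] by rw [heq]; simp),
        if_neg (show ¬(cs.drop i).take 5 = ['\\', 'l', 'e', 'f', 't'] by rw [heq]; simp),
        if_neg hn6]
    simp only [e1]
    rw [if_pos trivial]
    rw [ih cs (i + 2) (chars ++ ["\r"]) (by omega),
        pv_drop_add (k := 2) heq]
    simp
  case h_9 x r heq =>
    have hL := pv_drop_len heq
    simp only [List.length_cons] at hL
    have e0 : cs[i]! = '\\' := pv_getElem!_drop heq
    have hd1 : cs.drop (i + 1) = '\\' :: r := by simpa using pv_drop_add (k := 1) heq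
    have e1 : cs[i + 1]! = '\\' := pv_getElem!_drop hd1
    conv_lhs => rw [parse_command_string_loop]
    rw [if_pos (show i < cs.length by omega),
        if_pos (show cs[i]! = '\\' ∧ i + 1 < cs.length from ⟨e0, by omega⟩),
        if_neg (show ¬(cs.drop i).take 3 = ['\\', 'u', 'p'] by rw [heq]; simp),
        if_neg (show ¬(cs.drop i).take 5 = ['\\', 'd', 'o', 'w', 'n'] by rw [heq]; simp),
        if_neg (show ¬(cs.drop i).take 5 = ['\\', 'l', 'e', 'f', 't'] by rw [heq]; simp),
        if_neg (show ¬(cs.drop i).take 6 = ['\\', 'r', 'i', 'g', 'h', 't'] by rw [heq]; simp)]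
    simp only [e1]
    rw [if_pos trivial]
    rw [ih cs (i + 2) (chars ++ ["\\"]) (by omega),
        pv_drop_add (k := 2) heq]
    simp
  case h_10 x r heq =>
    have hL := pv_drop_len heq
    simp only [List.length_cons] at hL
    have e0 : cs[i]! = '\\' := pv_getElem!_drop heq
    have hd1 : cs.drop (i + 1) = '!' :: r := by simpa using pv_drop_add (k := 1) heq
    have e1 : cs[i + 1]! = '!' := pv_getElem!_drop hd1
    conv_lhs => rw [parse_command_string_loop]
    rw [if_pos (show i < cs.length by omega),
        if_pos (show cs[i]! = '\\' ∧ i + 1 < cs.length from ⟨e0, by omega⟩),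
        if_neg (show ¬(cs.drop i).take 3 = ['\\', 'u', 'p'] by rw [heq]; simp),
        if_neg (show ¬(cs.drop i).take 5 = ['\\', 'd', 'o', 'w', 'n'] by rw [heq]; simp),
        if_neg (show ¬(cs.drop i).take 5 = ['\\', 'l', 'e', 'f', 't'] by rw [heq]; simp),
        if_neg (show ¬(cs.drop i).take 6 = ['\\', 'r', 'i', 'g', 'h', 't'] by rw [heq]; simp)]
    simp only [e1]
    rw [if_pos trivial]
    rw [ih cs (i + 2) (chars ++ ["!"]) (by omega),
        pv_drop_add (k := 2) heq]
    simp
  case h_11 x c r hu hd hl hr ht hn hb hrr hbs hex heq =>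
    have hL := pv_drop_len heq
    simp only [List.length_cons] at hL
    have e0 : cs[i]! = '\\' := pv_getElem!_drop heq
    have hd1 : cs.drop (i + 1) = c :: r := by simpa using pv_drop_add (k := 1) heq
    have e1 : cs[i + 1]! = c := pv_getElem!_drop hd1
    have hn3 : ¬(cs.drop i).take 3 = ['\\', 'u', 'p'] := by
      rw [heq]; intro hc
      simp only [List.take_succ_cons, List.cons.injEq, true_and] at hc
      obtain ⟨hc1, hc2⟩ := hc
      rcases r with _ | ⟨a, r⟩
      · simp at hc2
      · simp only [List.take_succ_cons, List.take_zero, List.cons.injEq, and_true] at hc2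
        exact hu r hc1 (by rw [hc2])
    have hn5d : ¬(cs.drop i).take 5 = ['\\', 'd', 'o', 'w', 'n'] := by
      rw [heq]; intro hc
      simp only [List.take_succ_cons, List.cons.injEq, true_and] at hc
      obtain ⟨hc1, hc2⟩ := hc
      rcases r with _ | ⟨a, r⟩; · simp at hc2
      rcases r with _ | ⟨b, r⟩; · simp at hc2
      rcases r with _ | ⟨e, r⟩; · simp at hc2
      simp only [List.take_succ_cons, List.take_zero, List.cons.injEq, and_true] at hc2
      exact hd r hc1 (by rw [hc2.1, hc2.2.1, hc2.2.2])
    have hn5l : ¬(cs.drop i).take 5 = ['\\', 'l', 'e', 'f', 't'] := by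
      rw [heq]; intro hc
      simp only [List.take_succ_cons, List.cons.injEq, true_and] at hc
      obtain ⟨hc1, hc2⟩ := hc
      rcases r with _ | ⟨a, r⟩; · simp at hc2
      rcases r with _ | ⟨b, r⟩; · simp at hc2
      rcases r with _ | ⟨e, r⟩; · simp at hc2
      simp only [List.take_succ_cons, List.take_zero, List.cons.injEq, and_true] at hc2
      exact hl r hc1 (by rw [hc2.1, hc2.2.1, hc2.2.2])
    have hn6 : ¬(cs.drop i).take 6 = ['\\', 'r', 'i', 'g', 'h', 't'] := by
      rw [heq]; intro hc
      simp only [List.take_succ_cons, List.cons.injEq, true_and] at hc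
      obtain ⟨hc1, hc2⟩ := hc
      rcases r with _ | ⟨a, r⟩; · simp at hc2
      rcases r with _ | ⟨b, r⟩; · simp at hc2
      rcases r with _ | ⟨e, r⟩; · simp at hc2
      rcases r with _ | ⟨f, r⟩; · simp at hc2
      simp only [List.take_succ_cons, List.take_zero, List.cons.injEq, and_true] at hc2
      exact hr r hc1 (by rw [hc2.1, hc2.2.1, hc2.2.2.1, hc2.2.2.2])
    conv_lhs => rw [parse_command_string_loop]
    rw [if_pos (show i < cs.length by omega),
        if_pos (show cs[i]! = '\\' ∧ i + 1 < cs.length from ⟨e0, by omega⟩),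
        if_neg hn3, if_neg hn5d, if_neg hn5l, if_neg hn6]
    simp only [e1]
    rw [if_neg ht, if_neg hn, if_neg hb, if_neg hrr, if_neg hbs, if_neg hex]
    rw [ih cs (i + 2) (chars ++ ["\\", String.ofList [c]]) (by omega),
        pv_drop_add (k := 2) heq]
    simp
  case h_12 x c r h1 h2 h3 h4 h5 h6 h7 h8 h9 h10 hlast heq =>
    have hL := pv_drop_len heq
    simp only [List.length_cons] at hL
    have e0 : cs[i]! = c := pv_getElem!_drop heq
    have hcond : ¬(cs[i]! = '\\' ∧ i + 1 < cs.length) := by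
      rintro ⟨hb1, hb2⟩
      have hc : c = '\\' := e0.symm.trans hb1
      cases r with
      | nil => simp at hL; omega
      | cons a r' => exact hlast a r' hc rfl
    conv_lhs => rw [parse_command_string_loop]
    rw [if_pos (show i < cs.length by omega), if_neg hcond, e0]
    rw [ih cs (i + 1) (chars ++ [String.ofList [c]]) (by omega),
        pv_drop_add (k := 1) heq]
    simp
  case h_13 x heq =>
    have hL := pv_drop_len heq
    simp only [List.length_nil] at hL
    conv_lhs => rw [parse_command_string_loop]
    rw [if_neg (show ¬ i < cs.length by omega)]
    simp

-- ===== VERDICT (by name: the statement is the Claim_ definition above) =====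
theorem parse_command_string_spec : Claim_equal_parse_command_string := by
  intro cmd_str _
  unfold Spec_parse_command_string parse_command_string parse_command_string_alt
  simpa using parse_command_string_loop_eq cmd_str.toList.length cmd_str.toList 0 [] (by omega)
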